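-- pv_equiv track=rewrite | github.com/m1chaelv/COSC-1336 | Ch07_Exercises.py | lo_shu_digits
-- ===== SOURCE A (Python) =====
-- def lo_shu_digits(ls_nums):
--     k0=str(ls_nums)
--     if len(k0)!=9:
--         return(False)
--     for k1 in range(1,10):
--         if str(k1) not in k0:
--             return(False)
--     return(True)
-- ===== SOURCE B (Python) =====
-- def lo_shu_digits(ls_nums):
--     return sorted(str(ls_nums)) == list('123456789')
-- ===== Notes on version B (the rewrite author's own statement) =====
-- stated objective: idiomatic
-- what changed: B sorts the characters of str(ls_nums) once and compares with the canonical list '1'..'9', instead of a length guard plus a loop over 1..9 with a substring-membership scan for each digit.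
import Mathlib
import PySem

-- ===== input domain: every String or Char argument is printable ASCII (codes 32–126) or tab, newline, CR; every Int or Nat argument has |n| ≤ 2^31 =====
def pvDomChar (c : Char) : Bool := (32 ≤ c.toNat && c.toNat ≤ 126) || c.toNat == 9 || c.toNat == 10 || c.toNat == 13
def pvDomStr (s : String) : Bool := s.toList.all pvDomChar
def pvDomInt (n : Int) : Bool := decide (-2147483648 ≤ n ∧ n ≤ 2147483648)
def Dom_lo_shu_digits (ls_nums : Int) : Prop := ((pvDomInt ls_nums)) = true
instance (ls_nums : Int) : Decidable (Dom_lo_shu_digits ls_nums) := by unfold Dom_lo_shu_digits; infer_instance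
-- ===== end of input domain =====

-- B replaces A's length guard and digit-by-digit membership loop by one sort of the
-- characters of str(ls_nums) compared against the canonical list '1'..'9' (idiomatic).

-- ===== PORT A =====
def lo_shu_digits (ls_nums : Int) : Bool :=
  let k0 := PySem.Int.toStr ls_nums
  if PySem.Str.len k0 ≠ 9 then false
  else (PySem.List.pyRange 1 10 1).all (fun k1 => PySem.Str.isIn (PySem.Int.toStr k1) k0)

-- ===== PORT B =====
def lo_shu_digits_alt (ls_nums : Int) : Bool :=
  PySem.List.sorted (PySem.Int.toStr ls_nums).toList (fun c => c) false == "123456789".toList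

-- ===== PRECONDITION & SPEC =====
def Spec_lo_shu_digits (ls_nums : Int) (out : Bool) : Prop := out = lo_shu_digits_alt ls_nums
instance (ls_nums : Int) (out : Bool) : Decidable (Spec_lo_shu_digits ls_nums out) := by unfold Spec_lo_shu_digits; infer_instance

-- ===== CLAIM (what is proved, stated in full; the proofs are below) =====
def Claim_equal_lo_shu_digits : Prop := ∀ (ls_nums : Int), Dom_lo_shu_digits ls_nums → Spec_lo_shu_digits ls_nums (lo_shu_digits ls_nums)

-- ===== LEMMAS AND PROOFS =====

-- A 9-character list contains each of the nine distinct digits iff its sorted form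
-- is exactly ['1'..'9'].
theorem pan_iff (s : List Char) :
    (s.length = 9 ∧ ∀ c ∈ (['1','2','3','4','5','6','7','8','9'] : List Char), c ∈ s) ↔
      PySem.List.sorted s (fun c => c) false = ['1','2','3','4','5','6','7','8','9'] := by
  constructor
  · rintro ⟨hlen, hmem⟩
    have hsub : (['1','2','3','4','5','6','7','8','9'] : List Char) ⊆ s := fun c hc => hmem c hc
    have hnd : (['1','2','3','4','5','6','7','8','9'] : List Char).Nodup := by decide
    have hperm : List.Perm (['1','2','3','4','5','6','7','8','9'] : List Char) s :=
      (hnd.subperm hsub).perm_of_length_le (by simp [hlen])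
    exact PySem.List.sorted_eq_of_perm_of_pairwise_lt s _ _ hperm (by decide)
  · intro h
    have hperm : List.Perm (['1','2','3','4','5','6','7','8','9'] : List Char) s :=
      h ▸ PySem.List.sorted_perm s _ _
    exact ⟨by simpa using hperm.length_eq.symm, fun c hc => hperm.subset hc⟩

theorem ports_agree (n : Int) : lo_shu_digits n = lo_shu_digits_alt n := by
  unfold lo_shu_digits lo_shu_digits_alt
  rw [show PySem.List.pyRange 1 10 1 = [1, 2, 3, 4, 5, 6, 7, 8, 9] from rfl,
    show "123456789".toList = ['1','2','3','4','5','6','7','8','9'] from rfl]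
  by_cases h9 : (PySem.Int.toChars n).length = 9
  · rw [if_neg (by simp [PySem.Str.len_eq, PySem.Int.toList_toStr]; omega)]
    rw [Bool.eq_iff_iff]
    simp only [List.all_cons, List.all_nil, Bool.and_true, Bool.and_eq_true,
      PySem.Str.isIn_iff_infix, beq_iff_eq, PySem.Int.toList_toStr,
      show PySem.Int.toChars 1 = ['1'] from rfl,
      show PySem.Int.toChars 2 = ['2'] from rfl,
      show PySem.Int.toChars 3 = ['3'] from rfl,
      show PySem.Int.toChars 4 = ['4'] from rfl,
      show PySem.Int.toChars 5 = ['5'] from rfl,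
      show PySem.Int.toChars 6 = ['6'] from rfl,
      show PySem.Int.toChars 7 = ['7'] from rfl,
      show PySem.Int.toChars 8 = ['8'] from rfl,
      show PySem.Int.toChars 9 = ['9'] from rfl,
      List.singleton_infix_iff]
    rw [← pan_iff]
    constructor
    · rintro ⟨h1, h2, h3, h4, h5, h6, h7, h8, hh9⟩
      refine ⟨h9, ?_⟩
      intro c hc
      fin_cases hc <;> assumption
    · rintro ⟨-, hm⟩
      refine ⟨?_, ?_, ?_, ?_, ?_, ?_, ?_, ?_, ?_⟩ <;> exact hm _ (by simp)
  · rw [if_pos (by simp [PySem.Str.len_eq, PySem.Int.toList_toStr]; omega)]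
    have hne : PySem.List.sorted (PySem.Int.toChars n) (fun c => c) false ≠
        ['1','2','3','4','5','6','7','8','9'] := by
      intro h
      have hperm := h ▸ PySem.List.sorted_perm (PySem.Int.toChars n) (fun c : Char => c) false
      exact h9 (by simpa using hperm.length_eq.symm)
    simp [PySem.Int.toList_toStr, hne]

-- ===== VERDICT (by name: the statement is the Claim_ definition above) =====
theorem lo_shu_digits_spec : Claim_equal_lo_shu_digits := by
  intro n _
  exact ports_agree n
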